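-- pv_equiv track=rewrite | github.com/daogework/myPythonCodes | UnityCSharpToLuaHelper.py | iscontinueWith
-- ===== SOURCE A (Python) =====
-- def iscontinueWith(startindex,rstr, char):
--     for i in range(startindex, len(rstr)):
--         s = rstr[i]
--         if s==' ' or s=='\n':
--             continue
--         elif s==char:
--             return True
--         else:
--             break
--     return False
-- ===== SOURCE B (Python) =====
-- def iscontinueWith(startindex, rstr, char):
--     suffix = rstr[startindex:]
--     k = suffix.find(char)
--     if k < 0 or len(char) != 1 or char in ' \n':
--         return False
--     return all(c in ' \n' for c in suffix[:k])
-- ===== Notes on version B (the rewrite author's own statement) =====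
-- stated objective: alternative
-- what changed: Instead of scanning with continue/break, B locates the first occurrence of char in the suffix with str.find and returns True iff char is a single non-blank character that occurs and every character before that first occurrence is blank (' ' or '\n').
-- intended difference: For negative startindex (with -startindex <= len(rstr)) whose wrapped-around tail is all blanks while the first non-blank of the whole string equals char, A's negative indices wrap and re-scan the string from the front and it returns True; B scans only the suffix and returns False, the intended suffix semantics. — e.g. on iscontinueWith(-1, "a ", "a"): A returns true, B returns false
import Mathlib
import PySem

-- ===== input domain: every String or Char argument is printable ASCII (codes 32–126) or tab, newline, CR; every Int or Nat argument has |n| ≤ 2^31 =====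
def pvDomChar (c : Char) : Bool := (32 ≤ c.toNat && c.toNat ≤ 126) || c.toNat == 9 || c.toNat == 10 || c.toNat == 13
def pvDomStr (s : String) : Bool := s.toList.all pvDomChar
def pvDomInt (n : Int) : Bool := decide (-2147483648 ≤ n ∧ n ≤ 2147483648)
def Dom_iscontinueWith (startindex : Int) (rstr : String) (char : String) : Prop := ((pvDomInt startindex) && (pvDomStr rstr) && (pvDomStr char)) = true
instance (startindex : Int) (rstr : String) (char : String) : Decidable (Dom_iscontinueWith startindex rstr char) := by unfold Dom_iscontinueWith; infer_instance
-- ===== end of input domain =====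

-- B replaces A's scan-with-break by a different algorithm: locate the first occurrence of char with find,
-- then check everything before it is blank (alternative, same cost).

-- ===== PORT A =====
-- the for-loop body over range(startindex, len(rstr)): s = rstr[i]; blank → continue; s == char → True; else break (→ False)
def pvLoopA (rstr char : String) : List Int → Bool
  | [] => false
  | i :: rest =>
    match PySem.Str.pyGet? rstr i with
    | none => false   -- IndexError: rstr[i] out of range; excluded by Pre_
    | some c =>
      if c == ' ' || c == '\n' then pvLoopA rstr char rest
      else if String.ofList [c] == char then true   -- s == char (s is the 1-char string rstr[i])
      else false

def iscontinueWith (startindex : Int) (rstr : String) (char : String) : Bool :=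
  pvLoopA rstr char (PySem.List.pyRange startindex (PySem.Str.len rstr) 1)

-- ===== PORT B =====
-- suffix = rstr[startindex:]; k = suffix.find(char);
-- if k < 0 or len(char) != 1 or char in ' \n': return False
-- return all(c in ' \n' for c in suffix[:k])
def iscontinueWith_alt (startindex : Int) (rstr : String) (char : String) : Bool :=
  let suffix := PySem.Str.slice rstr (some startindex) none
  let k := PySem.Str.find suffix char
  if k < 0 || !(PySem.Str.len char == 1) || PySem.Str.isIn char " \n" then false
  else (PySem.Str.slice suffix none (some k)).toList.all
        (fun c => PySem.Str.isIn (String.ofList [c]) " \n")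

-- ===== PRECONDITION & SPEC =====
-- Pre_ excludes exactly the inputs where A raises IndexError: startindex below -len(rstr).
def Pre_iscontinueWith (startindex : Int) (rstr : String) (char : String) : Prop :=
  -(PySem.Str.len rstr) ≤ startindex
instance (startindex : Int) (rstr : String) (char : String) : Decidable (Pre_iscontinueWith startindex rstr char) := by unfold Pre_iscontinueWith; infer_instance
def pvWitness_iscontinueWith : Int × String × String := (0, " a", "a")

-- For negative startindex (within -len) whose wrapped tail is all blanks while the first non-blank of the whole
-- string equals char, A's negative indices wrap and re-scan the string from the front and it returns True;
-- B scans only the suffix and returns False, the intended suffix semantics.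
def D_iscontinueWith (startindex : Int) (rstr : String) (char : String) : Prop :=
  startindex < 0 ∧
  (rstr.toList.drop ((rstr.toList.length : Int) + startindex).toNat).all
      (fun c => decide (c = ' ' ∨ c = '\n')) = true ∧
  ((rstr.toList.dropWhile (fun c => decide (c = ' ' ∨ c = '\n'))).head?).map
      (fun c => String.ofList [c]) = some char
instance (startindex : Int) (rstr : String) (char : String) : Decidable (D_iscontinueWith startindex rstr char) := by unfold D_iscontinueWith; infer_instance

def Spec_iscontinueWith (startindex : Int) (rstr : String) (char : String) (out : Bool) : Prop := ¬ D_iscontinueWith startindex rstr char → out = iscontinueWith_alt startindex rstr char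
instance (startindex : Int) (rstr : String) (char : String) (out : Bool) : Decidable (Spec_iscontinueWith startindex rstr char out) := by unfold Spec_iscontinueWith; infer_instance

def pvDiffWitness_iscontinueWith : Int × String × String := (-1, "a ", "a")
def pvDiffWitnessOut_iscontinueWith : Bool × Bool := (true, false)

-- ===== CLAIM (what is proved, stated in full; the proofs are below) =====
def Claim_unchanged_iscontinueWith : Prop := ∀ (startindex : Int) (rstr : String) (char : String), Dom_iscontinueWith startindex rstr char → Pre_iscontinueWith startindex rstr char → Spec_iscontinueWith startindex rstr char (iscontinueWith startindex rstr char)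
def Claim_changed_iscontinueWith : Prop := Dom_iscontinueWith (pvDiffWitness_iscontinueWith.1) (pvDiffWitness_iscontinueWith.2.1) (pvDiffWitness_iscontinueWith.2.2) ∧ Pre_iscontinueWith (pvDiffWitness_iscontinueWith.1) (pvDiffWitness_iscontinueWith.2.1) (pvDiffWitness_iscontinueWith.2.2) ∧ D_iscontinueWith (pvDiffWitness_iscontinueWith.1) (pvDiffWitness_iscontinueWith.2.1) (pvDiffWitness_iscontinueWith.2.2) ∧ iscontinueWith (pvDiffWitness_iscontinueWith.1) (pvDiffWitness_iscontinueWith.2.1) (pvDiffWitness_iscontinueWith.2.2) = pvDiffWitnessOut_iscontinueWith.1 ∧ iscontinueWith_alt (pvDiffWitness_iscontinueWith.1) (pvDiffWitness_iscontinueWith.2.1) (pvDiffWitness_iscontinueWith.2.2) = pvDiffWitnessOut_iscontinueWith.2 ∧ pvDiffWitnessOut_iscontinueWith.1 ≠ pvDiffWitnessOut_iscontinueWith.2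
def Claim_exact_iscontinueWith : Prop := ∀ (startindex : Int) (rstr : String) (char : String), Dom_iscontinueWith startindex rstr char → Pre_iscontinueWith startindex rstr char → D_iscontinueWith startindex rstr char → iscontinueWith startindex rstr char ≠ iscontinueWith_alt startindex rstr char

-- ===== LEMMAS AND PROOFS =====

def pvBlank (c : Char) : Bool := c == ' ' || c == '\n'

theorem pvBlank_fun_eq : (fun c => decide (c = ' ' ∨ c = '\n')) = pvBlank := by
  funext c
  by_cases h1 : c = ' ' <;> by_cases h2 : c = '\n' <;> simp [pvBlank, h1, h2]

-- "the first non-blank character of l is char", as stated in D_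
def pvFirstNonBlankIs (l : List Char) (char : String) : Bool :=
  match l.dropWhile pvBlank with
  | [] => false
  | c :: _ => String.ofList [c] == char

theorem pvFirstNonBlankIs_iff (l : List Char) (char : String) :
    pvFirstNonBlankIs l char = true ↔
      ((l.dropWhile (fun c => decide (c = ' ' ∨ c = '\n'))).head?).map
        (fun c => String.ofList [c]) = some char := by
  rw [pvBlank_fun_eq, pvFirstNonBlankIs]
  cases l.dropWhile pvBlank with
  | nil => simp
  | cons c t => simp

-- the canonical scan both programs compute on a list of characters
def pvScan (char : String) : List Char → Bool
  | [] => false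
  | c :: rest => if pvBlank c then pvScan char rest else String.ofList [c] == char

theorem pvLoopA_eq_scan (rstr char : String) :
    ∀ (is : List Int) (cs : List Char),
      is.map (PySem.Str.pyGet? rstr) = cs.map some →
      pvLoopA rstr char is = pvScan char cs := by
  intro is
  induction is with
  | nil => intro cs h; cases cs <;> simp_all [pvLoopA, pvScan]
  | cons i rest ih =>
    intro cs h
    cases cs with
    | nil => simp at h
    | cons c cs' =>
      simp only [List.map_cons, List.cons.injEq] at h
      obtain ⟨h1, h2⟩ := h
      unfold pvLoopA
      rw [h1]
      simp only [pvScan, pvBlank, ih cs' h2]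
      by_cases hb1 : c = ' ' <;> by_cases hb2 : c = '\n' <;>
        by_cases hc : String.ofList [c] = char <;> simp [hb1, hb2, hc]

theorem pvScan_eq_dropWhile (char : String) (cs : List Char) :
    pvScan char cs = pvFirstNonBlankIs cs char := by
  induction cs with
  | nil => rfl
  | cons c cs ih =>
    by_cases h : pvBlank c = true
    · have hr : pvFirstNonBlankIs (c :: cs) char = pvFirstNonBlankIs cs char := by
        unfold pvFirstNonBlankIs
        rw [List.dropWhile_cons, if_pos h]
      rw [hr, ← ih]
      simp [pvScan, h]
    · have hr : pvFirstNonBlankIs (c :: cs) char = (String.ofList [c] == char) := by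
        unfold pvFirstNonBlankIs
        rw [List.dropWhile_cons, if_neg h]
      rw [hr]
      simp [pvScan, h]

theorem pvScan_append_blank (char : String) {xs : List Char} (ys : List Char)
    (h : xs.all pvBlank = true) : pvScan char (xs ++ ys) = pvScan char ys := by
  induction xs with
  | nil => rfl
  | cons x xs ih =>
    simp only [List.all_cons, Bool.and_eq_true] at h
    simp [pvScan, h.1, ih h.2]

theorem pvScan_all_blank (char : String) {xs : List Char}
    (h : xs.all pvBlank = true) : pvScan char xs = false := by
  have := pvScan_append_blank char [] h
  simpa using this

theorem pvScan_append_not_all (char : String) {xs : List Char} (ys : List Char)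
    (h : xs.all pvBlank = false) : pvScan char (xs ++ ys) = pvScan char xs := by
  induction xs with
  | nil => simp at h
  | cons x xs ih =>
    by_cases hx : pvBlank x = true
    · simp only [List.all_cons, hx, Bool.true_and] at h
      simp [pvScan, hx, ih h]
    · simp only [Bool.not_eq_true] at hx
      simp [pvScan, hx]

-- the drop-based characterisation of A: map over a range of in-range indices
theorem range_get (l : List Char) (m : Nat) :
    (List.range (l.length - m)).map (fun k => l[m + k]?) = (l.drop m).map some := by
  apply List.ext_getElem?
  intro i
  by_cases h : i < l.length - m
  · have hm : m + i < l.length := by omega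
    simp [h, List.getElem?_eq_getElem hm]
  · have h2 : i ≥ (l.drop m).length := by simp; omega
    rw [List.getElem?_map, List.getElem?_map, List.getElem?_eq_none (by simpa using h),
      List.getElem?_eq_none h2]
    rfl

theorem map_pyGet?_nonneg (l : List Char) (a : Int) (ha : 0 ≤ a) :
    (PySem.List.pyRange a (l.length : Int) 1).map (fun i => PySem.List.pyGet? l i)
      = (l.drop a.toNat).map some := by
  rw [PySem.List.pyRange_one, List.map_map]
  have hn : ((l.length : Int) - a).toNat = l.length - a.toNat := by omega
  rw [hn, ← range_get l a.toNat]
  apply List.map_congr_left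
  intro k _
  have : a + (k : Int) = ((a.toNat + k : Nat) : Int) := by omega
  show PySem.List.pyGet? l (a + (k : Int)) = l[a.toNat + k]?
  rw [this, PySem.List.pyGet?_natCast]

theorem map_pyGet?_neg (l : List Char) (a : Int) (ha : a < 0) (hb : -(l.length : Int) ≤ a) :
    (PySem.List.pyRange a 0 1).map (fun i => PySem.List.pyGet? l i)
      = (l.drop ((l.length : Int) + a).toNat).map some := by
  rw [PySem.List.pyRange_one, List.map_map]
  have hn : ((0 : Int) - a).toNat = l.length - ((l.length : Int) + a).toNat := by omega
  rw [hn, ← range_get l ((l.length : Int) + a).toNat]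
  apply List.map_congr_left
  intro k hk
  simp only [List.mem_range] at hk
  have hidx : l.length - (-(a + (k : Int))).toNat = ((l.length : Int) + a).toNat + k := by omega
  show PySem.List.pyGet? l (a + (k : Int)) = l[((l.length : Int) + a).toNat + k]?
  simp only [PySem.List.pyGet?, PySem.List.pyIdx?,
    if_neg (by omega : ¬ (0 : Int) ≤ a + (k : Int)),
    if_pos (by omega : -(l.length : Int) ≤ a + (k : Int)), Option.bind, hidx]

-- A in terms of pvScan
theorem A_eq_scan_nonneg (rstr char : String) (a : Int) (ha : 0 ≤ a) :
    iscontinueWith a rstr char = pvScan char (rstr.toList.drop a.toNat) := by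
  unfold iscontinueWith
  apply pvLoopA_eq_scan
  rw [PySem.Str.len_eq]
  have := map_pyGet?_nonneg rstr.toList a ha
  simpa [PySem.Str.pyGet?_eq, PySem.Chars.pyGet?_eq_listPyGet?] using this

theorem A_eq_scan_neg (rstr char : String) (a : Int) (ha : a < 0)
    (hb : -(rstr.toList.length : Int) ≤ a) :
    iscontinueWith a rstr char
      = pvScan char (rstr.toList.drop ((rstr.toList.length : Int) + a).toNat ++ rstr.toList) := by
  unfold iscontinueWith
  apply pvLoopA_eq_scan
  rw [PySem.Str.len_eq,
    PySem.List.pyRange_one_append a 0 (rstr.toList.length : Int) (by omega) (by omega),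
    List.map_append, List.map_append]
  have h1 := map_pyGet?_neg rstr.toList a ha hb
  have h2 := map_pyGet?_nonneg rstr.toList 0 (by omega)
  simp only [Int.toNat_zero, List.drop_zero] at h2
  have e : (PySem.Str.pyGet? rstr) = fun i => PySem.List.pyGet? rstr.toList i := by
    funext i
    rw [PySem.Str.pyGet?_eq, PySem.Chars.pyGet?_eq_listPyGet?]
  rw [e, h1, h2]

-- ===== B in terms of pvScan =====

theorem ofList_inj (c d : Char) (h : String.ofList [c] = String.ofList [d]) : c = d := by
  have := congrArg String.toList h
  simpa using this

theorem singleton_prefix_iff (a : Char) (l : List Char) : [a] <+: l ↔ l.head? = some a := by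
  cases l with
  | nil => simp
  | cons c t => simp [List.prefix_cons_iff, eq_comm]

theorem isIn_blank (c : Char) : PySem.Chars.isIn [c] [' ', '\n'] = pvBlank c := by
  cases h : PySem.Chars.isIn [c] [' ', '\n']
  · have := (PySem.Chars.isIn_eq_false_iff _ _).1 h
    rw [List.singleton_infix_iff] at this
    simp only [List.mem_cons, List.not_mem_nil, or_false, not_or] at this
    simp [pvBlank, this.1, this.2]
  · have := (PySem.Chars.isIn_iff_infix _ _).1 h
    rw [List.singleton_infix_iff] at this
    simp only [List.mem_cons, List.not_mem_nil, or_false] at this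
    rcases this with h' | h' <;> simp [pvBlank, h']

-- pvScan returns false when no element of l can satisfy the comparison
theorem pvScan_false_of_mem (char : String) (l : List Char)
    (h : ∀ c ∈ l, pvBlank c = false → String.ofList [c] ≠ char) :
    pvScan char l = false := by
  induction l with
  | nil => rfl
  | cons c t ih =>
    by_cases hb : pvBlank c = true
    · simp only [pvScan, hb, if_pos rfl]
      exact ih (fun d hd => h d (List.mem_cons_of_mem _ hd))
    · simp only [Bool.not_eq_true] at hb
      simp [pvScan, hb, h c (List.mem_cons_self) hb]

-- pvScan when char occurs first at position k: the answer is "everything before k is blank"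
theorem pvScan_of_first (ch : Char) (hch : pvBlank ch = false) (char : String)
    (hc : char = String.ofList [ch]) :
    ∀ (l : List Char) (k : Nat), l[k]? = some ch → (∀ i < k, l[i]? ≠ some ch) →
      pvScan char l = (l.take k).all pvBlank := by
  intro l
  induction l with
  | nil => intro k hk _; simp at hk
  | cons c t ih =>
    intro k hk hmin
    cases k with
    | zero =>
      simp only [List.getElem?_cons_zero, Option.some.injEq] at hk
      subst hk
      simp [pvScan, hch, hc]
    | succ k' =>
      have hc0 : c ≠ ch := by
        intro he
        exact hmin 0 (Nat.succ_pos _) (by simp [he])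
      by_cases hb : pvBlank c = true
      · simp only [pvScan, hb, if_pos rfl, List.take_succ_cons, List.all_cons, hb,
          Bool.true_and]
        exact ih k' (by simpa using hk) (fun i hi => by
          have := hmin (i + 1) (by omega)
          simpa using this)
      · simp only [Bool.not_eq_true] at hb
        have : String.ofList [c] ≠ char := by
          rw [hc]; intro he; exact hc0 (ofList_inj _ _ he)
        simp [pvScan, hb, this]

-- the main bridge: B equals pvScan of the sliced suffix
theorem B_eq_scan (rstr char : String) (a : Int) :
    iscontinueWith_alt a rstr char
      = pvScan char (PySem.List.slice rstr.toList (some a) none) := by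
  simp only [iscontinueWith_alt]
  rw [PySem.Str.find_eq, PySem.Str.toList_slice, PySem.Chars.slice_eq_listSlice,
    PySem.Str.isIn_eq, PySem.Str.len_eq]
  set l := PySem.List.slice rstr.toList (some a) none with hl
  show (if PySem.Chars.find l char.toList < 0 || !((char.toList.length : Int) == 1) || PySem.Chars.isIn char.toList (" \n".toList) then false
        else (PySem.Str.slice (PySem.Str.slice rstr (some a) none) none (some (PySem.Chars.find l char.toList))).toList.all
              (fun c => PySem.Str.isIn (String.ofList [c]) " \n")) = pvScan char l
  by_cases hlen : char.toList.length = 1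
  · obtain ⟨ch, hch⟩ := List.length_eq_one_iff.1 hlen
    have hcs : char = String.ofList [ch] := by
      rw [← hch, String.ofList_toList]
    rw [hch]
    set k := PySem.Chars.find l [ch] with hk
    by_cases hblank : pvBlank ch = true
    · -- char is ' ' or '\n': B's guard fires; pvScan never matches a blank char
      have hin : PySem.Chars.isIn [ch] (" \n".toList) = true := by
        show PySem.Chars.isIn [ch] [' ', '\n'] = true
        rw [isIn_blank]; exact hblank
      rw [hin]
      simp only [Bool.or_true, if_true]
      symm
      apply pvScan_false_of_mem
      intro c _ hcb he
      rw [hcs] at he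
      rw [ofList_inj c ch he] at hcb
      rw [hcb] at hblank
      exact Bool.false_ne_true hblank
    · -- char is a single non-blank character
      simp only [Bool.not_eq_true] at hblank
      have hin : PySem.Chars.isIn [ch] (" \n".toList) = false := by
        show PySem.Chars.isIn [ch] [' ', '\n'] = false
        rw [isIn_blank]; exact hblank
      rw [hin]
      have hone : ((([ch] : List Char).length : Int) == 1) = true := by simp
      rw [hone]
      simp only [Bool.not_true, Bool.or_false]
      by_cases hneg : k < 0
      · -- char does not occur in l
        have hk1 : k = -1 := by have := PySem.Chars.neg_one_le_find l [ch]; omega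
        have hnin : ¬ [ch] <:+: l := (PySem.Chars.find_eq_neg_one_iff _ _).1 hk1
        rw [List.singleton_infix_iff] at hnin
        rw [if_pos (by simp [hneg])]
        symm
        apply pvScan_false_of_mem
        intro c hc _ he
        rw [hcs] at he
        exact hnin (by rw [← ofList_inj c ch he]; exact hc)
      · -- char occurs first at position k
        push_neg at hneg
        obtain ⟨hpre, hmin⟩ := PySem.Chars.find_spec (s := l) (sub := [ch]) (by omega)
        rw [singleton_prefix_iff, List.head?_drop] at hpre
        have hmin' : ∀ i < k.toNat, l[i]? ≠ some ch := by
          intro i hi he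
          exact hmin i hi (by rw [singleton_prefix_iff, List.head?_drop]; exact he)
        rw [if_neg (by simp [not_lt.2 hneg])]
        rw [pvScan_of_first ch hblank char hcs l k.toNat hpre hmin']
        -- suffix[:k] is take k.toNat of l
        rw [PySem.Str.toList_slice, PySem.Chars.slice_eq_listSlice, PySem.Str.toList_slice,
          PySem.Chars.slice_eq_listSlice, ← hl, PySem.List.slice_to l hneg]
        have hf : (fun c => PySem.Str.isIn (String.ofList [c]) " \n") = pvBlank := by
          funext c
          rw [PySem.Str.isIn_eq]
          show PySem.Chars.isIn (String.ofList [c]).toList [' ', '\n'] = pvBlank c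
          rw [show (String.ofList [c]).toList = [c] by simp]
          exact isIn_blank c
        rw [hf]
  · -- len(char) ≠ 1: B's guard fires; pvScan compares a 1-char string with char, never equal
    have h1 : ¬ ((char.toList.length : Int) = 1) := by exact_mod_cast hlen
    rw [if_pos (by simp [← String.length_toList, hlen])]
    symm
    apply pvScan_false_of_mem
    intro c _ _ he
    apply hlen
    rw [← he]
    simp

theorem slice_from_neg (l : List Char) (a : Int) (ha : a < 0) (hb : -(l.length : Int) ≤ a) :
    PySem.List.slice l (some a) none = l.drop ((l.length : Int) + a).toNat := by
  rw [PySem.List.slice_some_none]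
  congr 1
  simp only [PySem.List.clampIdx, if_pos ha, if_neg (by omega : ¬ (l.length : Int) + a < 0)]

-- ===== VERDICT (by name: the statement is the Claim_ definition above) =====
theorem iscontinueWith_spec : Claim_unchanged_iscontinueWith := by
  intro a rstr char _ hpre hnd
  unfold Pre_iscontinueWith at hpre
  rw [PySem.Str.len_eq] at hpre
  by_cases ha : 0 ≤ a
  · rw [A_eq_scan_nonneg rstr char a ha, B_eq_scan,
      PySem.List.slice_from rstr.toList ha]
  · replace ha : a < 0 := by omega
    rw [A_eq_scan_neg rstr char a ha hpre, B_eq_scan,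
      slice_from_neg rstr.toList a ha hpre]
    by_cases hblank : (rstr.toList.drop ((rstr.toList.length : Int) + a).toNat).all pvBlank = true
    · rw [pvScan_append_blank char rstr.toList hblank, pvScan_all_blank char hblank]
      have hfst : pvFirstNonBlankIs rstr.toList char = false := by
        by_contra h
        refine hnd ⟨ha, ?_, (pvFirstNonBlankIs_iff rstr.toList char).1 (by simpa using h)⟩
        rw [pvBlank_fun_eq]
        exact hblank
      rw [pvScan_eq_dropWhile, hfst]
    · rw [pvScan_append_not_all char rstr.toList (by simpa using hblank)]

set_option maxRecDepth 8192 in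
theorem iscontinueWith_changed : Claim_changed_iscontinueWith := by
  unfold Claim_changed_iscontinueWith; decide

theorem iscontinueWith_tight : Claim_exact_iscontinueWith := by
  intro a rstr char _ hpre hd
  obtain ⟨ha, hblank', hfst'⟩ := hd
  rw [pvBlank_fun_eq] at hblank'
  have hblank : (rstr.toList.drop ((rstr.toList.length : Int) + a).toNat).all pvBlank = true :=
    hblank'
  have hfst : pvFirstNonBlankIs rstr.toList char = true :=
    (pvFirstNonBlankIs_iff rstr.toList char).2 hfst'
  unfold Pre_iscontinueWith at hpre
  rw [PySem.Str.len_eq] at hpre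
  rw [A_eq_scan_neg rstr char a ha hpre, B_eq_scan, slice_from_neg rstr.toList a ha hpre,
    pvScan_append_blank char rstr.toList hblank, pvScan_all_blank char hblank,
    pvScan_eq_dropWhile, hfst]
  simp
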